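-- pv_equiv track=rewrite | github.com/davidackroyd99/dotnetfunfacts | scripts/generate_json.py | _get_fact_metadata
-- ===== SOURCE A (Python) =====
-- META = "!meta"
--
-- END_META = "!end"
--
-- def _get_fact_metadata(fact_data: str) -> dict:
-- 	metadata = {}
-- 	meta_mode = False
--
-- 	for line in fact_data.splitlines():
-- 		if line == META:
-- 			meta_mode = True
-- 		if line == END_META:
-- 			break
-- 		if meta_mode and ":" in line:
-- 			key, val = "", ""
-- 			# sometimes metadata keys don't have values, but the front end will still probably want them
-- 			# so in these cases we just set the val to an empty string
-- 			# TODO: big method, split up.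
-- 			try:
-- 				key, val = line.split(":")
-- 			except ValueError:
-- 				key = line.split(":")[0]
-- 				val = ""
--
-- 			if key == "tags":
-- 				metadata["tags"] = val.split(";")
-- 			else:
-- 				metadata[key] = val
--
-- 	return metadata
-- ===== SOURCE B (Python) =====
-- META = "!meta"
--
-- END_META = "!end"
--
--
-- def _get_fact_metadata(fact_data: str) -> dict:
-- 	# Stage 1: materialize the metadata block by index search + slicing.
-- 	lines = fact_data.splitlines()
-- 	if END_META in lines:
-- 		lines = lines[:lines.index(END_META)]
-- 	if META in lines:
-- 		block = lines[lines.index(META) + 1:]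
-- 	else:
-- 		block = []
-- 	# Stage 2: parse the block.
-- 	metadata = {}
-- 	for line in block:
-- 		if ":" in line:
-- 			parts = line.split(":")
-- 			val = parts[1] if len(parts) == 2 else ""
-- 			if parts[0] == "tags":
-- 				metadata["tags"] = val.split(";")
-- 			else:
-- 				metadata[parts[0]] = val
-- 	return metadata
-- ===== Notes on version B (the rewrite author's own statement) =====
-- stated objective: alternative
-- what changed: Replaces A's single flag-driven loop (meta_mode flag, mid-loop break, try/except split) with a two-stage extract-then-parse structure: the metadata block is first materialized by index search and slicing (cut at the first end marker, keep everything after the first meta marker), then parsed in a separate pass that branches on the split's part count instead of catching ValueError; the tags special case (value split on semicolons into a list) is reproduced exactly.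
import Mathlib
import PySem

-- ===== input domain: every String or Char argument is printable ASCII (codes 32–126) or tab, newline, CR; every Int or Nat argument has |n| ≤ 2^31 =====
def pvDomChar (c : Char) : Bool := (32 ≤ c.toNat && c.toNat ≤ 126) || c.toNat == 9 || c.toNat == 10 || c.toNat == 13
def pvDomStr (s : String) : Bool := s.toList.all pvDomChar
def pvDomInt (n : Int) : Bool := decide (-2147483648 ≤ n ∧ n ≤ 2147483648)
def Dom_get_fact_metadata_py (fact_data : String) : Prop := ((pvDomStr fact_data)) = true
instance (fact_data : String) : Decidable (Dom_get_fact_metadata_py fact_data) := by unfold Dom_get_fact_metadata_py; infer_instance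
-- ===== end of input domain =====

-- B extracts the metadata block first (index search + slicing), then parses it in a second pass —
-- an extract-then-parse decomposition replacing A's single flag-driven loop; same cost ('alternative').
-- Python's "tags" value is the LIST val.split(";"); both Pythons compute it identically, and both
-- ports represent that list by its ";"-join, which is exactly val (join ∘ split(";") = id), so the
-- String-valued dict below is a faithful injective encoding of both Pythons' heterogeneous dict.

-- ===== PORT A =====
-- the loop of _get_fact_metadata: state = (meta_mode, metadata); '!end' breaks
def pvGoA : List String → Bool → PySem.Dict String String → PySem.Dict String String
  | [], _, metadata => metadata
  | line :: rest, meta_mode, metadata =>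
    let meta_mode := if line == "!meta" then true else meta_mode
    if line == "!end" then metadata
    else if meta_mode && PySem.Str.isIn ":" line then
      -- try: key, val = line.split(":")  /  except ValueError: key = parts[0]; val = ""
      let parts := (PySem.Str.split? line ":").getD [""]   -- sep ":" ≠ "", so split? is never none
      let kv : String × String :=
        if parts.length == 2 then (parts.getD 0 "", parts.getD 1 "") else (parts.getD 0 "", "")
      -- Python stores the list kv.2.split(";") here; its ";"-join equals kv.2 (encoding above)
      if kv.1 == "tags" then pvGoA rest meta_mode (PySem.Dict.insert metadata "tags" kv.2)
      else pvGoA rest meta_mode (PySem.Dict.insert metadata kv.1 kv.2)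
    else pvGoA rest meta_mode metadata

def get_fact_metadata_py (fact_data : String) : List (String × String) :=
  (pvGoA (PySem.Str.splitlines fact_data) false PySem.Dict.empty).items

-- ===== PORT B =====
-- stage 1 of Source B: lines = lines[:lines.index("!end")] if "!end" in lines else lines
def pvCutEnd (lines : List String) : List String :=
  if lines.contains "!end"
    then PySem.List.slice lines none (some (((PySem.List.index? lines "!end").getD 0 : Nat) : Int))
    else lines

-- stage 1 of Source B: block = lines[lines.index("!meta") + 1:] if "!meta" in lines else []
def pvAfterMeta (lines : List String) : List String :=
  if lines.contains "!meta"
    then PySem.List.slice lines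
      (some ((((PySem.List.index? lines "!meta").getD 0 : Nat) : Int) + 1)) none
    else []

-- stage 2 of Source B: parse the materialized block
def pvParseB : List String → PySem.Dict String String → PySem.Dict String String
  | [], metadata => metadata
  | line :: rest, metadata =>
    if PySem.Str.isIn ":" line then
      let parts := (PySem.Str.split? line ":").getD [""]   -- sep ":" ≠ "", so split? is never none
      let val := if parts.length == 2 then parts.getD 1 "" else ""
      -- Python stores the list val.split(";") here; its ";"-join equals val (encoding above)
      if parts.getD 0 "" == "tags" then pvParseB rest (PySem.Dict.insert metadata "tags" val)
      else pvParseB rest (PySem.Dict.insert metadata (parts.getD 0 "") val)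
    else pvParseB rest metadata

def get_fact_metadata_py_alt (fact_data : String) : List (String × String) :=
  (pvParseB (pvAfterMeta (pvCutEnd (PySem.Str.splitlines fact_data))) PySem.Dict.empty).items

-- ===== PRECONDITION & SPEC =====
def Spec_get_fact_metadata_py (fact_data : String) (out : List (String × String)) : Prop := out = get_fact_metadata_py_alt fact_data
instance (fact_data : String) (out : List (String × String)) : Decidable (Spec_get_fact_metadata_py fact_data out) := by unfold Spec_get_fact_metadata_py; infer_instance

-- ===== CLAIM (what is proved, stated in full; the proofs are below) =====
def Claim_equal_get_fact_metadata_py : Prop := ∀ (fact_data : String), Dom_get_fact_metadata_py fact_data → Spec_get_fact_metadata_py fact_data (get_fact_metadata_py fact_data)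

-- ===== LEMMAS AND PROOFS =====

-- the metadata block, as takeWhile/dropWhile (proof-side characterization of both stage-1 forms)
def pvBlockSpec (lines : List String) : List String :=
  match (lines.takeWhile (fun l => l != "!end")).dropWhile (fun l => l != "!meta") with
  | [] => []
  | _ :: t => t

theorem pvTakeWhile_of_not_mem {v : String} {lines : List String}
    (h : v ∉ lines) : lines.takeWhile (fun l => l != v) = lines := by
  induction lines with
  | nil => rfl
  | cons x t ih =>
    simp only [List.mem_cons, not_or] at h
    simp [Ne.symm h.1, ih h.2]

theorem pvDropWhile_of_not_mem {v : String} {lines : List String}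
    (h : v ∉ lines) : lines.dropWhile (fun l => l != v) = [] := by
  induction lines with
  | nil => rfl
  | cons x t ih =>
    simp only [List.mem_cons, not_or] at h
    simp [Ne.symm h.1, ih h.2]

theorem pvTake_index {v : String} {lines : List String} (h : v ∈ lines) :
    lines.take ((PySem.List.index? lines v).getD 0) = lines.takeWhile (fun l => l != v) := by
  induction lines with
  | nil => simp at h
  | cons x t ih =>
    by_cases hx : x = v
    · subst hx
      rw [PySem.List.index?_cons_self]
      simp
    · have hv : v ∈ t := (List.mem_cons.mp h).resolve_left (fun e => hx e.symm)
      obtain ⟨k, hk⟩ := Option.isSome_iff_exists.mp ((PySem.List.index?_isSome_iff t v).2 hv)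
      have ih' := ih hv
      rw [PySem.List.index?_cons_of_ne t hx, hk] at ⊢
      rw [hk] at ih'
      have hxv : (x != v) = true := by simpa using hx
      simp only [Option.map_some, Option.getD_some, List.take_succ_cons, List.takeWhile_cons, hxv,
        if_true] at ih' ⊢
      rw [ih']

theorem pvDrop_index {v : String} {lines : List String} (h : v ∈ lines) :
    lines.drop ((PySem.List.index? lines v).getD 0 + 1)
      = (match lines.dropWhile (fun l => l != v) with | [] => [] | _ :: t => t) := by
  induction lines with
  | nil => simp at h
  | cons x t ih =>
    by_cases hx : x = v
    · subst hx
      rw [PySem.List.index?_cons_self]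
      simp
    · have hv : v ∈ t := (List.mem_cons.mp h).resolve_left (fun e => hx e.symm)
      obtain ⟨k, hk⟩ := Option.isSome_iff_exists.mp ((PySem.List.index?_isSome_iff t v).2 hv)
      have ih' := ih hv
      rw [PySem.List.index?_cons_of_ne t hx, hk] at ⊢
      rw [hk] at ih'
      have hxv : (x != v) = true := by simpa using hx
      simp only [Option.map_some, Option.getD_some, List.drop_succ_cons, List.dropWhile_cons, hxv,
        if_true] at ih' ⊢
      rw [ih']

theorem pvCutEnd_eq (lines : List String) :
    pvCutEnd lines = lines.takeWhile (fun l => l != "!end") := by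
  unfold pvCutEnd
  by_cases he : "!end" ∈ lines
  · rw [if_pos (by simpa using he), PySem.List.slice_to_natCast, pvTake_index he]
  · rw [if_neg (by simpa using he), pvTakeWhile_of_not_mem he]

theorem pvAfterMeta_eq (lines : List String) :
    pvAfterMeta lines
      = (match lines.dropWhile (fun l => l != "!meta") with | [] => [] | _ :: t => t) := by
  unfold pvAfterMeta
  by_cases hm : "!meta" ∈ lines
  · rw [if_pos (by simpa using hm)]
    have : ((((PySem.List.index? lines "!meta").getD 0 : Nat) : Int) + 1)
        = (((PySem.List.index? lines "!meta").getD 0 + 1 : Nat) : Int) := by push_cast; ring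
    rw [this, PySem.List.slice_from_natCast, pvDrop_index hm]
  · rw [if_neg (by simpa using hm), pvDropWhile_of_not_mem hm]

theorem pvGoA_true (lines : List String) (md : PySem.Dict String String) :
    pvGoA lines true md = pvParseB (lines.takeWhile (fun l => l != "!end")) md := by
  induction lines generalizing md with
  | nil => rfl
  | cons line rest ih =>
    by_cases hend : line = "!end"
    · subst hend
      simp [pvGoA, pvParseB]
    · have htwc : (line :: rest).takeWhile (fun l => l != "!end")
          = line :: rest.takeWhile (fun l => l != "!end") := by
        simp [hend]
      rw [htwc]
      by_cases hc : PySem.Str.isIn ":" line = true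
      · simp only [pvGoA, pvParseB, ite_self,
          if_neg (by simpa using hend : ¬(line == "!end") = true), Bool.true_and, hc, if_true, ih]
        split_ifs with h1 h2 <;> simp_all
      · simp only [pvGoA, pvParseB, ite_self,
          if_neg (by simpa using hend : ¬(line == "!end") = true), Bool.true_and]
        rw [if_neg hc, if_neg hc, ih]

theorem pvGoA_false (lines : List String) (md : PySem.Dict String String) :
    pvGoA lines false md = pvParseB (pvBlockSpec lines) md := by
  induction lines generalizing md with
  | nil => rfl
  | cons line rest ih =>
    by_cases hend : line = "!end"
    · subst hend
      simp [pvGoA, pvParseB, pvBlockSpec]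
    · by_cases hmeta : line = "!meta"
      · subst hmeta
        have : pvGoA ("!meta" :: rest) false md = pvGoA rest true md := by
          rfl
        rw [this, pvGoA_true]
        have hblock : pvBlockSpec ("!meta" :: rest)
            = rest.takeWhile (fun l => l != "!end") := by
          simp [pvBlockSpec]
        rw [hblock]
      · have hblock : pvBlockSpec (line :: rest) = pvBlockSpec rest := by
          simp [pvBlockSpec, hend, hmeta]
        have hstep : pvGoA (line :: rest) false md = pvGoA rest false md := by
          simp only [pvGoA, if_neg (by simpa using hmeta : ¬(line == "!meta") = true),
            if_neg (by simpa using hend : ¬(line == "!end") = true), Bool.false_and,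
            Bool.false_eq_true, if_false]
        rw [hstep, hblock, ih]

theorem pvBlock_eq_spec (fact_data : String) :
    pvAfterMeta (pvCutEnd (PySem.Str.splitlines fact_data))
      = pvBlockSpec (PySem.Str.splitlines fact_data) := by
  unfold pvBlockSpec
  rw [pvCutEnd_eq, pvAfterMeta_eq]

-- ===== VERDICT (by name: the statement is the Claim_ definition above) =====
theorem get_fact_metadata_py_spec : Claim_equal_get_fact_metadata_py := by
  intro fact_data _
  unfold Spec_get_fact_metadata_py get_fact_metadata_py get_fact_metadata_py_alt
  rw [pvGoA_false, pvBlock_eq_spec]
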